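-- pv_equiv track=rewrite | github.com/tomcusack1/python-algorithms | Arrays/odd.py | odd_numbers
-- ===== SOURCE A (Python) =====
-- def odd_numbers(n: int) -> list:
--     """This function returns a list of 20 odd numbers up from N
--
--     For example:
--         N = 1 --> [1, 3, 5, ... 39] (1-40)
--         N = 2 --> [3, 5, 7, ... 41] (2-41)
--         N = 3 --> [3, 5, 7, ... 41] (3-42)
--
--     """
--     try:
--         if n % 2 is 0:
--             return list(i for i in range(n+1, n+41, 2))
--         else:
--             return list(i for i in range(n, n+39, 2))
--
--     except TypeError:
--         return []
-- ===== SOURCE B (Python) =====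
-- def odd_numbers(n: int) -> list:
--     """Return the 20 odd numbers at or above n: scan the contiguous span
--     [n, n+40) and keep the values with odd parity (exactly 20 of them)."""
--     out = []
--     try:
--         for x in range(n, n + 40):
--             if x % 2:
--                 out.append(x)
--     except TypeError:
--         return []
--     return out
-- ===== Notes on version B (the rewrite author's own statement) =====
-- stated objective: alternative
-- what changed: Replaces A's parity branch over two stepped ranges by a single filtering scan: iterate the contiguous span of forty integers starting at n with an accumulator and keep the odd ones.
import Mathlib
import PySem

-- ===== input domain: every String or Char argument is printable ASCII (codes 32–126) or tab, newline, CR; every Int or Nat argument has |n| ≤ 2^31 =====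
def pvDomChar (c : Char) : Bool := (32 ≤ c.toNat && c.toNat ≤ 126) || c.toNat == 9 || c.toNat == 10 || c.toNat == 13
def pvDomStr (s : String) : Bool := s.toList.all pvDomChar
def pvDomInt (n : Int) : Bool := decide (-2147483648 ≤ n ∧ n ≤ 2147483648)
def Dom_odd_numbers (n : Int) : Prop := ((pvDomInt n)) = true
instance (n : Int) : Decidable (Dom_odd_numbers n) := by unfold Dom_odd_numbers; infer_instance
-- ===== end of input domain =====

-- B drops A's parity branch over two stepped ranges: it scans the contiguous span [n, n+40)
-- once with an accumulator, keeping the odd values (alternative decomposition, same cost).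

-- ===== PORT A =====
def odd_numbers (n : Int) : List Int :=
  if PySem.Int.mod n 2 == 0 then
    PySem.List.pyRange (n + 1) (n + 41) 2
  else
    PySem.List.pyRange n (n + 39) 2

-- ===== PORT B =====
def odd_numbers_alt (n : Int) : List Int :=
  (PySem.List.pyRange n (n + 40) 1).foldl
    (fun out x => if PySem.Int.mod x 2 != 0 then out ++ [x] else out) []

-- ===== PRECONDITION & SPEC =====
def Spec_odd_numbers (n : Int) (out : List Int) : Prop := out = odd_numbers_alt n
instance (n : Int) (out : List Int) : Decidable (Spec_odd_numbers n out) := by unfold Spec_odd_numbers; infer_instance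

-- ===== CLAIM (what is proved, stated in full; the proofs are below) =====
def Claim_equal_odd_numbers : Prop := ∀ (n : Int), Dom_odd_numbers n → Spec_odd_numbers n (odd_numbers n)

-- ===== LEMMAS AND PROOFS =====

-- The parity filter over 2k consecutive integers starting at an even n keeps the k odd ones.
theorem pv_filter_even (n : Int) (h : n % 2 = 0) (k : Nat) :
    ((List.range (2*k)).map (fun i : Nat => n + i)).filter (fun x => x % 2 != 0)
      = (List.range k).map (fun i : Nat => n + 1 + 2*i) := by
  induction k with
  | zero => simp
  | succ k ih =>
    have h2 : 2*(k+1) = (2*k + 1) + 1 := by ring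
    rw [h2, List.range_succ, List.range_succ, List.range_succ]
    simp only [List.map_append, List.filter_append, ih, List.map_cons, List.map_nil,
      List.filter_cons, List.filter_nil]
    have e1 : ((n + (2*k : Nat)) % 2 != 0) = false := by
      rw [bne_eq_false_iff_eq]; push_cast; omega
    have e2 : ((n + ((2*k + 1 : Nat) : Int)) % 2 != 0) = true := by
      rw [bne_iff_ne]; push_cast; omega
    rw [e1, e2]
    simp only [if_true, Bool.false_eq_true, if_false, List.append_nil]
    first
    | rfl
    | (congr 1; congr 1; push_cast; ring)

-- The parity filter over 2k consecutive integers starting at an odd n keeps the k odd ones.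
theorem pv_filter_odd (n : Int) (h : n % 2 = 1) (k : Nat) :
    ((List.range (2*k)).map (fun i : Nat => n + i)).filter (fun x => x % 2 != 0)
      = (List.range k).map (fun i : Nat => n + 2*i) := by
  induction k with
  | zero => simp
  | succ k ih =>
    have h2 : 2*(k+1) = (2*k + 1) + 1 := by ring
    rw [h2, List.range_succ, List.range_succ, List.range_succ]
    simp only [List.map_append, List.filter_append, ih, List.map_cons, List.map_nil,
      List.filter_cons, List.filter_nil]
    have e1 : ((n + (2*k : Nat)) % 2 != 0) = true := by
      rw [bne_iff_ne]; push_cast; omega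
    have e2 : ((n + ((2*k + 1 : Nat) : Int)) % 2 != 0) = false := by
      rw [bne_eq_false_iff_eq]; push_cast; omega
    rw [e1, e2]
    simp only [if_true, Bool.false_eq_true, if_false, List.append_nil]
    rfl

-- ===== VERDICT (by name: the statement is the Claim_ definition above) =====
theorem odd_numbers_spec : Claim_equal_odd_numbers := by
  intro n _
  unfold Spec_odd_numbers odd_numbers odd_numbers_alt
  rw [PySem.List.foldl_append_if_eq_filter, List.nil_append,
      PySem.List.pyRange_one,
      PySem.List.pyRange_of_pos _ _ (by norm_num : (0:Int) < 2),
      PySem.List.pyRange_of_pos _ _ (by norm_num : (0:Int) < 2)]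
  have hmod : ∀ x : Int, PySem.Int.mod x 2 = x % 2 := fun x => by
    have := PySem.Int.mod_eq_emod_of_pos (a := x) (b := 2) (by norm_num)
    exact this
  simp only [hmod]
  have hA : (if (n+1) < (n+41) then ((n + 41 - (n + 1) + 2 - 1) / 2).toNat else 0) = 20 := by
    rw [if_pos (by omega)]; omega
  have hB : (if n < (n+39) then ((n + 39 - n + 2 - 1) / 2).toNat else 0) = 20 := by
    rw [if_pos (by omega)]; omega
  have hb : (n + 40 - n).toNat = 2 * 20 := by omega
  rw [hA, hB, hb]
  rcases Int.emod_two_eq_zero_or_one n with h | h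
  · rw [if_pos (by simp [h]), pv_filter_even n h 20]
  · rw [if_neg (by simp [h]), pv_filter_odd n h 20]
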